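-- pv_equiv track=rewrite | github.com/florentz14/python-excercises | 07_Lists_and_Tuples/extra_156_add_lists_from_right.py | add_lists_right
-- ===== SOURCE A (Python) =====
-- def add_lists_right(a: list[int], b: list[int]) -> list[int]:
--     na, nb = len(a), len(b)
--     if na >= nb:
--         b_padded = [0] * (na - nb) + b
--         return [a[i] + b_padded[i] for i in range(na)]
--     else:
--         a_padded = [0] * (nb - na) + a
--         return [a_padded[i] + b[i] for i in range(nb)]
-- ===== SOURCE B (Python) =====
-- from itertools import zip_longest
--
-- def add_lists_right(a: list[int], b: list[int]) -> list[int]: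
--     sums = [x + y for x, y in zip_longest(reversed(a), reversed(b), fillvalue=0)]
--     sums.reverse()
--     return sums
-- ===== Notes on version B (the rewrite author's own statement) =====
-- stated objective: idiomatic
-- what changed: B aligns from the right by reversing both lists and summing pairs via itertools.zip_longest(fillvalue=0), then reversing back, removing A's length comparison branch and explicit zero-padding lists.
import Mathlib
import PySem

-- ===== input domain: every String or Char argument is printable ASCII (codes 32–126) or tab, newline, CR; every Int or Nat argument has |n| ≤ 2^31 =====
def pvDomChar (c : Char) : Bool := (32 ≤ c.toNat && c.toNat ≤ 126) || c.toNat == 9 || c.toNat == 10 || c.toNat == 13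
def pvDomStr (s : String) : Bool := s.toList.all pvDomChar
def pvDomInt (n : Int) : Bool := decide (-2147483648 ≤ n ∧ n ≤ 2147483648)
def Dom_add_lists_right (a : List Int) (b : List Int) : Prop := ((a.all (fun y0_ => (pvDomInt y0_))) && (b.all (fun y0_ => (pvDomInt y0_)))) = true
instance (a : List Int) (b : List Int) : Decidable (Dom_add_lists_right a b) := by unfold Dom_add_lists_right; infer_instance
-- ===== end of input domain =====

-- B right-aligns by reversing both lists and summing pairs (zip_longest, fillvalue 0), then
-- reversing back — removing A's length-comparison branch and explicit padding lists (idiomatic).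

-- ===== PORT A =====
def add_lists_right (a : List Int) (b : List Int) : List Int :=
  let na : Int := a.length
  let nb : Int := b.length
  if na ≥ nb then
    let b_padded := List.replicate (na - nb).toNat (0 : Int) ++ b
    (PySem.List.pyRange 0 na 1).map
      (fun i => PySem.List.pyGetD a i 0 + PySem.List.pyGetD b_padded i 0)
  else
    let a_padded := List.replicate (nb - na).toNat (0 : Int) ++ a
    (PySem.List.pyRange 0 nb 1).map
      (fun i => PySem.List.pyGetD a_padded i 0 + PySem.List.pyGetD b i 0)

-- ===== PORT B =====
-- zip_longest(xs, ys, fillvalue=0) paired with the summing comprehension, as one recursion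
def zipLongAdd : List Int → List Int → List Int
  | [], [] => []
  | [], y :: ys => (0 + y) :: zipLongAdd [] ys
  | x :: xs, [] => (x + 0) :: zipLongAdd xs []
  | x :: xs, y :: ys => (x + y) :: zipLongAdd xs ys

def add_lists_right_alt (a : List Int) (b : List Int) : List Int :=
  (zipLongAdd a.reverse b.reverse).reverse

-- ===== PRECONDITION & SPEC =====
def Spec_add_lists_right (a : List Int) (b : List Int) (out : List Int) : Prop := out = add_lists_right_alt a b
instance (a : List Int) (b : List Int) (out : List Int) : Decidable (Spec_add_lists_right a b out) := by unfold Spec_add_lists_right; infer_instance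

-- ===== CLAIM (what is proved, stated in full; the proofs are below) =====
def Claim_equal_add_lists_right : Prop := ∀ (a : List Int) (b : List Int), Dom_add_lists_right a b → Spec_add_lists_right a b (add_lists_right a b)

-- ===== LEMMAS AND PROOFS =====

-- indexing two equal-length lists over range n is zipWith (+)
theorem map_range_getD_add (xs : List Int) : ∀ (ys : List Int), xs.length = ys.length →
    (List.range xs.length).map (fun i => xs.getD i 0 + ys.getD i 0) = List.zipWith (· + ·) xs ys := by
  induction xs with
  | nil => intro ys h; simp
  | cons x xs ih =>
    intro ys h
    cases ys with
    | nil => simp at h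
    | cons y ys =>
      simp only [List.length_cons, List.range_succ_eq_map, List.map_cons, List.map_map]
      simp only [List.getD_cons_zero, List.zipWith_cons_cons]
      refine congrArg _ ?_
      have := ih ys (by simpa using h)
      simpa [Function.comp] using this

-- zipLongAdd pads the shorter list with trailing zeros and adds pointwise
theorem zipLongAdd_eq_zipWith : ∀ (xs ys : List Int),
    zipLongAdd xs ys =
      List.zipWith (· + ·) (xs ++ List.replicate (ys.length - xs.length) 0)
        (ys ++ List.replicate (xs.length - ys.length) 0) := by
  intro xs
  induction xs with
  | nil =>
    intro ys
    induction ys with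
    | nil => simp [zipLongAdd]
    | cons y ys ihy => simp [zipLongAdd, List.replicate_succ, ihy]
  | cons x xs ih =>
    intro ys
    cases ys with
    | nil =>
      simp only [zipLongAdd, List.length_nil, List.length_cons, Nat.zero_sub,
        List.replicate, List.append_nil, List.nil_append,
        List.zipWith_cons_cons]
      rw [ih []]
      simp
    | cons y ys =>
      simp only [zipLongAdd, List.length_cons, Nat.succ_sub_succ, List.cons_append,
        List.zipWith_cons_cons]
      rw [ih ys]

-- common closed description of both programs: left-pad with zeros, then pointwise sum
theorem alt_eq_pad (a b : List Int) :
    add_lists_right_alt a b =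
      List.zipWith (· + ·) (List.replicate (b.length - a.length) 0 ++ a)
        (List.replicate (a.length - b.length) 0 ++ b) := by
  unfold add_lists_right_alt
  rw [zipLongAdd_eq_zipWith]
  have hlen : (a.reverse ++ List.replicate (b.reverse.length - a.reverse.length) (0:Int)).length =
      (b.reverse ++ List.replicate (a.reverse.length - b.reverse.length) (0:Int)).length := by
    simp [List.length_append]; omega
  rw [List.reverse_zipWith hlen]
  simp [List.reverse_append]

theorem a_eq_pad (a b : List Int) :
    add_lists_right a b =
      List.zipWith (· + ·) (List.replicate (b.length - a.length) 0 ++ a)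
        (List.replicate (a.length - b.length) 0 ++ b) := by
  unfold add_lists_right
  by_cases h : (a.length : Int) ≥ (b.length : Int)
  · have hba : b.length ≤ a.length := by exact_mod_cast h
    have h1 : b.length - a.length = 0 := by omega
    have h2 : ((a.length : Int) - (b.length : Int)).toNat = a.length - b.length := by omega
    simp only [if_pos h, h1, h2, List.replicate_zero, List.nil_append]
    have hlen : (List.replicate (a.length - b.length) (0:Int) ++ b).length = a.length := by
      simp; omega
    have : (PySem.List.pyRange 0 (a.length : Int) 1).map
        (fun i => PySem.List.pyGetD a i 0 +
          PySem.List.pyGetD (List.replicate (a.length - b.length) (0:Int) ++ b) i 0) =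
        (List.range a.length).map
        (fun i : Nat => a.getD i 0 + (List.replicate (a.length - b.length) (0:Int) ++ b).getD i 0) := by
      rw [PySem.List.pyRange_zero_natCast, List.map_map]
      simp [Function.comp]
    rw [this, map_range_getD_add a _ hlen.symm]
  · have hab : a.length ≤ b.length := by omega
    have h1 : a.length - b.length = 0 := by omega
    have h2 : ((b.length : Int) - (a.length : Int)).toNat = b.length - a.length := by omega
    simp only [if_neg h, h1, h2, List.replicate_zero, List.nil_append]
    have hlen : (List.replicate (b.length - a.length) (0:Int) ++ a).length = b.length := by
      simp; omega
    have : (PySem.List.pyRange 0 (b.length : Int) 1).map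
        (fun i => PySem.List.pyGetD (List.replicate (b.length - a.length) (0:Int) ++ a) i 0 +
          PySem.List.pyGetD b i 0) =
        (List.range b.length).map
        (fun i : Nat => (List.replicate (b.length - a.length) (0:Int) ++ a).getD i 0 + b.getD i 0) := by
      rw [PySem.List.pyRange_zero_natCast, List.map_map]
      simp [Function.comp]
    rw [this]
    have h3 := map_range_getD_add (List.replicate (b.length - a.length) (0:Int) ++ a) b hlen
    rwa [hlen] at h3

-- ===== VERDICT (by name: the statement is the Claim_ definition above) =====
theorem add_lists_right_spec : Claim_equal_add_lists_right := by
  intro a b _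
  unfold Spec_add_lists_right
  rw [a_eq_pad, alt_eq_pad]
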